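-- pv_equiv track=rewrite | github.com/AlessandroConti11/Constant_Time-Parallel_Shuffling | djb_code/djb_code.py | insertionseries_linearscan_after_sort_ref
-- ===== SOURCE A (Python) =====
-- def insertionseries_sort_ref(XY):
--     L = []
--     for x,y in XY:
--         L = ( [(u,v) for u,v in L if u<x]
--               + [(x,y)]
--               + [(u+1,v) for u,v in L if x<=u]
--               )
--     return L
--
-- def insertionseries_linearscan_after_sort_ref(L,XY):
--     L = list(L)
--     R = insertionseries_sort_ref(XY)
--     result = []
--     for x,y in R:
--         segment,L = L[:x-len(result)],L[x-len(result):]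
--         result += segment+[y]
--     return result+L
-- ===== SOURCE B (Python) =====
-- def insertionseries_linearscan_after_sort_ref(L, XY):
--     # Final position of each insertion, computed independently: every later
--     # insertion whose raw position is <= the current position bumps it by one.
--     pts = []
--     for i, (x, y) in enumerate(XY):
--         p = x
--         for xj, _ in XY[i + 1:]:
--             if xj <= p:
--                 p += 1
--         pts.append((p, y))
--     # Apply the insertions at their final positions, left to right.
--     pts.sort(key=lambda t: t[0])
--     out = list(L)
--     for p, y in pts:
--         out.insert(p, y)
--     return out
-- ===== Notes on version B (the rewrite author's own statement) =====
-- stated objective: alternative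
-- what changed: B computes each insertion's final position independently against its tail, sorts the (position,value) pairs once, and applies them with plain list.insert, replacing A's repeated rebuild of the position list (two filters plus an append per insertion) and its slicing merge; Pre_ restricts to nonnegative insertion positions, the function's natural domain - on negative positions A's result comes from Python negative-slice wraparound.
-- outside the precondition, e.g. on insertionseries_linearscan_after_sort_ref([1, 2], [(-1, 7), (0, 8)]): A returns [1, 7, 8, 2], B returns [8, 1, 7, 2]
import Mathlib
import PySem

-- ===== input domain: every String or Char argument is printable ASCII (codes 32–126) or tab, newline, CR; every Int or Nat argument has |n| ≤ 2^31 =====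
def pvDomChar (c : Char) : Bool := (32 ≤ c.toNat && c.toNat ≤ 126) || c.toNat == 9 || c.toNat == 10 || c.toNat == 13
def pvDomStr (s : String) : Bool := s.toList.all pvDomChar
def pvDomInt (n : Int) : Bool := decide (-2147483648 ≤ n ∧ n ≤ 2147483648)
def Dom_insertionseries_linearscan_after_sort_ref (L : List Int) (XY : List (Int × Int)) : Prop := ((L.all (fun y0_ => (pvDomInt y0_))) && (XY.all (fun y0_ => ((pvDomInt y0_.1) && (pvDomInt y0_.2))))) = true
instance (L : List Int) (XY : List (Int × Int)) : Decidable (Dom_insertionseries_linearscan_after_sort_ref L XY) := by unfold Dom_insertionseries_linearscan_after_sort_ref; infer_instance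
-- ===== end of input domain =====

-- B computes each insertion's final position independently, sorts the pairs once, and
-- applies them with plain list.insert (alternative decomposition, similar cost).

-- ===== PORT A =====
-- one step of insertionseries_sort_ref's loop body
def pvStepA (acc : List (Int × Int)) (xy : Int × Int) : List (Int × Int) :=
  (acc.filter (fun uv => uv.1 < xy.1))
    ++ [(xy.1, xy.2)]
    ++ ((acc.filter (fun uv => xy.1 ≤ uv.1)).map (fun uv => (uv.1 + 1, uv.2)))

-- insertionseries_sort_ref
def pvSortRefA (XY : List (Int × Int)) : List (Int × Int) := XY.foldl pvStepA []

-- one step of the merge loop of A: state = (result, remaining L)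
def pvMergeStepA (st : List Int × List Int) (xy : Int × Int) : List Int × List Int :=
  let k : Int := xy.1 - (st.1.length : Int)
  (st.1 ++ PySem.List.slice st.2 none (some k) ++ [xy.2],
   PySem.List.slice st.2 (some k) none)

def insertionseries_linearscan_after_sort_ref (L : List Int) (XY : List (Int × Int)) : List Int :=
  let R := pvSortRefA XY
  let st := R.foldl pvMergeStepA ([], L)
  st.1 ++ st.2

-- ===== PORT B =====
-- inner loop of Source B: bump p once for every later raw position ≤ p
def pvFinalPos (x : Int) (rest : List (Int × Int)) : Int :=
  rest.foldl (fun p xy => if xy.1 ≤ p then p + 1 else p) x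

-- the pts-building loop of Source B (each element paired with its tail, as enumerate/slice does)
def pvPts : List (Int × Int) → List (Int × Int)
  | [] => []
  | (x, y) :: rest => (pvFinalPos x rest, y) :: pvPts rest

def insertionseries_linearscan_after_sort_ref_alt (L : List Int) (XY : List (Int × Int)) : List Int :=
  let pts := PySem.List.sorted (pvPts XY) (fun t => t.1) false
  pts.foldl (fun out py => PySem.List.insert out py.1 py.2) L

-- ===== PRECONDITION & SPEC =====
-- Pre_ restricts to the function's natural domain, nonnegative insertion positions; on
-- negative positions A still returns, but its value is an artefact of Python's
-- negative-slice wraparound in 'L[:x-len(result)]', which B's list.insert does not mimic.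
def Pre_insertionseries_linearscan_after_sort_ref (L : List Int) (XY : List (Int × Int)) : Prop :=
  (XY.all (fun xy => 0 ≤ xy.1)) = true
instance (L : List Int) (XY : List (Int × Int)) : Decidable (Pre_insertionseries_linearscan_after_sort_ref L XY) := by unfold Pre_insertionseries_linearscan_after_sort_ref; infer_instance

def pvWitness_insertionseries_linearscan_after_sort_ref : List Int × (List (Int × Int)) :=
  ([10, 20, 30], [(0, 9), (2, 8), (1, 7)])

def Spec_insertionseries_linearscan_after_sort_ref (L : List Int) (XY : List (Int × Int)) (out : List Int) : Prop := out = insertionseries_linearscan_after_sort_ref_alt L XY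
instance (L : List Int) (XY : List (Int × Int)) (out : List Int) : Decidable (Spec_insertionseries_linearscan_after_sort_ref L XY out) := by unfold Spec_insertionseries_linearscan_after_sort_ref; infer_instance

-- ===== CLAIM (what is proved, stated in full; the proofs are below) =====
def Claim_equal_insertionseries_linearscan_after_sort_ref : Prop := ∀ (L : List Int) (XY : List (Int × Int)), Dom_insertionseries_linearscan_after_sort_ref L XY → Pre_insertionseries_linearscan_after_sort_ref L XY → Spec_insertionseries_linearscan_after_sort_ref L XY (insertionseries_linearscan_after_sort_ref L XY)

-- ===== LEMMAS AND PROOFS =====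

lemma pvStepA_pairwise {acc : List (Int × Int)} (xy : Int × Int)
    (h : acc.Pairwise (fun a b => a.1 < b.1)) :
    (pvStepA acc xy).Pairwise (fun a b => a.1 < b.1) := by
  unfold pvStepA
  rw [List.append_assoc, List.singleton_append, List.pairwise_append]
  refine ⟨h.filter _, List.pairwise_cons.mpr ⟨?_, ?_⟩, ?_⟩
  · intro b hb
    simp only [List.mem_map, List.mem_filter] at hb
    obtain ⟨uv, ⟨_, hle⟩, rfl⟩ := hb
    simp at hle ⊢; omega
  · refine (h.filter _).map _ ?_
    intro a b hab; simpa using by omega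
  · intro a ha b hb
    simp only [List.mem_filter] at ha
    rcases List.mem_cons.mp hb with rfl | hb
    · simpa using by simpa using ha.2
    · simp only [List.mem_map, List.mem_filter] at hb
      obtain ⟨uv, ⟨_, hle⟩, rfl⟩ := hb
      have := ha.2; simp at this hle ⊢; omega

lemma foldl_stepA_pairwise (XY : List (Int × Int)) :
    ∀ acc, acc.Pairwise (fun a b => a.1 < b.1) →
      (XY.foldl pvStepA acc).Pairwise (fun a b => a.1 < b.1) := by
  induction XY with
  | nil => intro acc h; simpa using h
  | cons xy T ih => intro acc h; exact ih _ (pvStepA_pairwise xy h)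

lemma pvSortRefA_pairwise (XY : List (Int × Int)) :
    (pvSortRefA XY).Pairwise (fun a b => a.1 < b.1) :=
  foldl_stepA_pairwise XY [] (by simp)

-- A's accumulator is a permutation of the pointwise final positions
lemma foldl_stepA_perm (XY : List (Int × Int)) :
    ∀ acc, (XY.foldl pvStepA acc).Perm
      (pvPts XY ++ acc.map (fun uv => (pvFinalPos uv.1 XY, uv.2))) := by
  induction XY with
  | nil =>
      intro acc
      simp [pvPts, pvFinalPos]
  | cons xy T ih =>
      intro acc
      obtain ⟨x, y⟩ := xy
      have h1 := ih (pvStepA acc (x, y))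
      refine h1.trans ?_
      have hmap : (pvStepA acc (x, y)).map (fun uv => (pvFinalPos uv.1 T, uv.2))
          = (acc.filter (fun uv => uv.1 < x)).map (fun uv => (pvFinalPos uv.1 ((x, y) :: T), uv.2))
            ++ [(pvFinalPos x T, y)]
            ++ (acc.filter (fun uv => x ≤ uv.1)).map (fun uv => (pvFinalPos uv.1 ((x, y) :: T), uv.2)) := by
        unfold pvStepA
        simp only [List.map_append, List.map_map, List.map_cons, List.map_nil]
        congr 1
        · congr 1
          apply List.map_congr_left
          intro uv hm
          simp only [List.mem_filter, decide_eq_true_eq] at hm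
          simp [pvFinalPos, List.foldl_cons, if_neg (by omega : ¬ x ≤ uv.1)]
        · apply List.map_congr_left
          intro uv hm
          simp only [List.mem_filter, decide_eq_true_eq] at hm
          simp [Function.comp, pvFinalPos, List.foldl_cons, if_pos hm.2]
      rw [hmap]
      have hfil : ((acc.filter (fun uv => uv.1 < x)).map (fun uv => (pvFinalPos uv.1 ((x, y) :: T), uv.2))
            ++ (acc.filter (fun uv => x ≤ uv.1)).map (fun uv => (pvFinalPos uv.1 ((x, y) :: T), uv.2))).Perm
            (acc.map (fun uv => (pvFinalPos uv.1 ((x, y) :: T), uv.2))) := by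
        rw [← List.map_append]
        apply List.Perm.map
        have := List.filter_append_perm (fun uv => decide (uv.1 < x)) acc
        refine List.Perm.trans ?_ this
        apply List.Perm.append_left
        apply List.Perm.of_eq
        congr 1
        funext uv
        simp only [← decide_not, decide_eq_decide]
        omega
      have hin : ((acc.filter (fun uv => uv.1 < x)).map (fun uv => (pvFinalPos uv.1 ((x, y) :: T), uv.2))
            ++ [(pvFinalPos x T, y)]
            ++ (acc.filter (fun uv => x ≤ uv.1)).map (fun uv => (pvFinalPos uv.1 ((x, y) :: T), uv.2))).Perm
          ((pvFinalPos x T, y) :: ((acc.filter (fun uv => uv.1 < x)).map (fun uv => (pvFinalPos uv.1 ((x, y) :: T), uv.2))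
            ++ (acc.filter (fun uv => x ≤ uv.1)).map (fun uv => (pvFinalPos uv.1 ((x, y) :: T), uv.2)))) := by
        rw [List.append_assoc, List.singleton_append]
        exact List.perm_middle
      refine (List.Perm.append_left (pvPts T) hin).trans ?_
      rw [show pvPts ((x, y) :: T) = (pvFinalPos x T, y) :: pvPts T from rfl]
      refine List.perm_middle.trans ?_
      exact List.Perm.cons _ (List.Perm.append_left _ hfil)

lemma pvSortRefA_perm (XY : List (Int × Int)) :
    (pvSortRefA XY).Perm (pvPts XY) := by
  simpa using foldl_stepA_perm XY []

-- the final position is at least the raw position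
lemma pvFinalPos_ge (rest : List (Int × Int)) : ∀ x : Int, x ≤ pvFinalPos x rest := by
  induction rest with
  | nil => intro x; simp [pvFinalPos]
  | cons r T ih =>
      intro x
      have h1 : x ≤ (if r.1 ≤ x then x + 1 else x) := by split_ifs <;> omega
      have h2 := ih (if r.1 ≤ x then x + 1 else x)
      simp only [pvFinalPos, List.foldl_cons] at h2 ⊢
      omega

lemma pvPts_nonneg (XY : List (Int × Int)) (h : ∀ xy ∈ XY, 0 ≤ xy.1) :
    ∀ q ∈ pvPts XY, 0 ≤ q.1 := by
  induction XY with
  | nil => simp [pvPts]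
  | cons xy T ih =>
      obtain ⟨x, y⟩ := xy
      intro q hq
      rw [show pvPts ((x, y) :: T) = (pvFinalPos x T, y) :: pvPts T from rfl] at hq
      rcases List.mem_cons.mp hq with rfl | hq
      · have hx : (0 : Int) ≤ x := h (x, y) (List.mem_cons_self)
        exact le_trans hx (pvFinalPos_ge T x)
      · exact ih (fun z hz => h z (List.mem_cons_of_mem _ hz)) q hq

-- insert at a nonnegative position is take ++ value ++ drop (clamped)
lemma insert_nonneg_eq (xs : List Int) (i : Int) (hi : 0 ≤ i) (v : Int) :
    PySem.List.insert xs i v = xs.take i.toNat ++ v :: xs.drop i.toNat := by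
  by_cases hle : i ≤ (xs.length : Int)
  · have h1 : i = ((i.toNat : Nat) : Int) := by omega
    rw [h1, PySem.List.insert_natCast xs i.toNat v (by omega)]
    simp
    have h2 : max i 0 = i := by omega
    rw [h2]
  · -- i past the end: the insert clamps to the length and appends
    have hlen : xs.length ≤ i.toNat := by omega
    have h1 : i = ((i.toNat : Nat) : Int) := by omega
    rw [List.take_of_length_le hlen, List.drop_of_length_le hlen, h1]
    simp [PySem.List.insert, PySem.List.sliceIndices]
    have h2 : (min (max i 0) (xs.length : Int)).toNat = xs.length := by omega
    rw [h2, List.take_length, List.drop_length]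

-- the two merge loops agree on sorted nonnegative positions
lemma mergeA_eq_insert (R : List (Int × Int)) : ∀ (res rem : List Int),
    R.Pairwise (fun a b => a.1 < b.1) →
    (∀ q ∈ R, ((res.length : Int) ≤ q.1)) →
    (R.foldl pvMergeStepA (res, rem)).1 ++ (R.foldl pvMergeStepA (res, rem)).2
      = R.foldl (fun out py => PySem.List.insert out py.1 py.2) (res ++ rem) := by
  induction R with
  | nil => intro res rem _ _; simp
  | cons py R ih =>
      intro res rem hpw hge
      obtain ⟨p, y⟩ := py
      have hp : (res.length : Int) ≤ p := hge (p, y) (List.mem_cons_self)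
      set k : Int := p - (res.length : Int) with hk
      have hk0 : 0 ≤ k := by omega
      have hstepA : pvMergeStepA (res, rem) (p, y)
          = (res ++ rem.take k.toNat ++ [y], rem.drop k.toNat) := by
        simp only [pvMergeStepA, ← hk, PySem.List.slice_to _ hk0, PySem.List.slice_from _ hk0]
      have hins : PySem.List.insert (res ++ rem) p y
          = (res ++ rem.take k.toNat ++ [y]) ++ rem.drop k.toNat := by
        rw [insert_nonneg_eq _ _ (by omega) y]
        have hpn : p.toNat = res.length + k.toNat := by omega
        rw [hpn, List.take_append, List.drop_append,
          List.take_of_length_le (by omega : res.length ≤ res.length + k.toNat),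
          List.drop_of_length_le (by omega : res.length ≤ res.length + k.toNat)]
        simp
      simp only [List.foldl_cons, hstepA, hins]
      apply ih
      · exact (List.pairwise_cons.mp hpw).2
      · intro q hq
        have hlt : p < q.1 := (List.pairwise_cons.mp hpw).1 q hq
        simp only [List.length_append, List.length_take, List.length_cons, List.length_nil]
        push_cast
        omega

-- ===== VERDICT (by name: the statement is the Claim_ definition above) =====
theorem insertionseries_linearscan_after_sort_ref_spec : Claim_equal_insertionseries_linearscan_after_sort_ref := by
  intro L XY _ hpre
  simp only [Pre_insertionseries_linearscan_after_sort_ref, List.all_eq_true,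
    decide_eq_true_eq] at hpre
  unfold Spec_insertionseries_linearscan_after_sort_ref
  unfold insertionseries_linearscan_after_sort_ref insertionseries_linearscan_after_sort_ref_alt
  have hR : PySem.List.sorted (pvPts XY) (fun t => t.1) false = pvSortRefA XY :=
    PySem.List.sorted_eq_of_perm_of_pairwise_lt (pvPts XY) (pvSortRefA XY) (fun t : Int × Int => t.1) (pvSortRefA_perm XY) (pvSortRefA_pairwise XY)
  simp only [hR]
  have hnn : ∀ q ∈ pvSortRefA XY, (([] : List Int).length : Int) ≤ q.1 := by
    intro q hq
    have := pvPts_nonneg XY hpre q ((pvSortRefA_perm XY).mem_iff.mp hq)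
    simpa using this
  have := mergeA_eq_insert (pvSortRefA XY) [] L (pvSortRefA_pairwise XY) hnn
  simpa using this
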